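-- pv_equiv track=rewrite | github.com/pr28416/Garage | ACSL 2021/c_1/c_1_sol.py | sumOfLastRow
-- ===== SOURCE A (Python) =====
-- def sumOfLastRow(s, d, r):
--     s = int("0o" + str(s), 8)
--     d = int("0o" + str(d), 8)
--     n = (r - 1) * r // 2 + 1
--
--     fin = 0
--     for i in range(n, n + r):
--         a = oct(s + d * (i - 1))
--         for j in range(2, len(a)):
--             fin += int(a[j])
--     return fin
-- ===== SOURCE B (Python) =====
-- def sumOfLastRow(s, d, r):
--     sv = int(str(s), 8)
--     dv = int(str(d), 8)
--     n = (r - 1) * r // 2 + 1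
--     fin = 0
--     for i in range(n, n + r):
--         v = sv + dv * (i - 1)
--         while v:
--             fin += v % 8
--             v //= 8
--     return fin
-- ===== Notes on version B (the rewrite author's own statement) =====
-- stated objective: idiomatic
-- what changed: The inner digit sum no longer builds the string oct(value) and re-parses each character with int(); B extracts octal digits arithmetically (v % 8, v //= 8) in a while loop.
import Mathlib
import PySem

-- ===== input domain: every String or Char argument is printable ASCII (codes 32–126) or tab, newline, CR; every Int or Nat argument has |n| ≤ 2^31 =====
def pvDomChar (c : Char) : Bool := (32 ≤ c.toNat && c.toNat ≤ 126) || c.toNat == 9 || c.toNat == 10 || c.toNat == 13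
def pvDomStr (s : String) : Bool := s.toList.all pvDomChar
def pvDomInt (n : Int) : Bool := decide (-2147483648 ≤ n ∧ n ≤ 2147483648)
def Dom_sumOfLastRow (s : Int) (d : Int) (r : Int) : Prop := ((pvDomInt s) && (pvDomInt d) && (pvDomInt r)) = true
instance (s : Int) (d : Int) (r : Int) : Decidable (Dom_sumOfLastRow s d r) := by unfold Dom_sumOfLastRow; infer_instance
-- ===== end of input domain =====

-- B replaces A's string-based octal digit sum (oct(value) then int of each character)
-- with arithmetic digit extraction by repeated division by 8; same cost, more idiomatic.


-- ===== PORT A =====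
-- int("0o" + str(x), 8) (and B's int(str(x), 8), which Python evaluates to the same
-- number since int(·, 8) accepts an optional "0o" prefix): fold base 8 over the decimal
-- digit characters of str(x), negating after a leading '-'. Exact wherever Python's
-- int(…, 8) returns instead of raising ValueError (on Pre_: x ≥ 0, all digits < 8).
def octValOfDec (x : Int) : Int :=
  match (PySem.Int.toStr x).toList with
  | '-' :: cs => -(cs.foldl (fun acc c => acc * 8 + ((c.toNat : Int) - 48)) 0)
  | cs => cs.foldl (fun acc c => acc * 8 + ((c.toNat : Int) - 48)) 0

-- octal digit characters of m, most significant first (helper for oct())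
def octChars (m : Nat) (acc : List Char) : List Char :=
  if h : m = 0 then acc else octChars (m / 8) (Char.ofNat (48 + m % 8) :: acc)
termination_by m
decreasing_by exact Nat.div_lt_self (Nat.pos_of_ne_zero h) (by norm_num)

-- oct(v) = "0o" + octal digits; exact for v ≥ 0 (Pre_ keeps every summed value ≥ 0)
def octStr (v : Int) : String :=
  String.ofList ('0' :: 'o' :: (if v.toNat = 0 then ['0'] else octChars v.toNat []))

def sumOfLastRow (s : Int) (d : Int) (r : Int) : Int :=
  let sv := octValOfDec s
  let dv := octValOfDec d
  let n := PySem.Int.floordiv ((r - 1) * r) 2 + 1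
  (PySem.List.pyRange n (n + r) 1).foldl (fun fin i =>
    let a := octStr (sv + dv * (i - 1))
    -- for j in range(2, len(a)): fin += int(a[j]); int of a digit character is code − 48
    (PySem.List.pyRange 2 (a.toList.length : Int) 1).foldl
      (fun f j => f + (((PySem.List.pyGetD a.toList j '0').toNat : Int) - 48)) fin) 0

-- ===== PORT B =====
-- while v: fin += v % 8; v //= 8 — iterated on v.toNat; exact for v ≥ 0
-- (for v < 0 the Python loop would not terminate; Pre_ keeps every value ≥ 0)
def digitLoop (v : Nat) (fin : Int) : Int :=
  if h : v = 0 then fin else digitLoop (v / 8) (fin + ((v % 8 : Nat) : Int))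
termination_by v
decreasing_by exact Nat.div_lt_self (Nat.pos_of_ne_zero h) (by norm_num)

def sumOfLastRow_alt (s : Int) (d : Int) (r : Int) : Int :=
  let sv := octValOfDec s
  let dv := octValOfDec d
  let n := PySem.Int.floordiv ((r - 1) * r) 2 + 1
  (PySem.List.pyRange n (n + r) 1).foldl
    (fun fin i => digitLoop (sv + dv * (i - 1)).toNat fin) 0

-- ===== PRECONDITION & SPEC =====
-- Pre_: exactly the inputs on which A returns — s and d must be nonnegative and consist
-- of octal digits (else int("0o"+str(s), 8) raises ValueError; a negative summed value
-- would also make int(a[j]) hit the '-' / 'o' characters and raise).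
def Pre_sumOfLastRow (s : Int) (d : Int) (r : Int) : Prop :=
  0 ≤ s ∧ 0 ≤ d ∧ (∀ k ∈ Nat.digits 10 s.toNat, k < 8) ∧ (∀ k ∈ Nat.digits 10 d.toNat, k < 8)
instance (s : Int) (d : Int) (r : Int) : Decidable (Pre_sumOfLastRow s d r) := by
  unfold Pre_sumOfLastRow; infer_instance

def pvWitness_sumOfLastRow : Int × Int × Int := (7, 3, 2)

def Spec_sumOfLastRow (s : Int) (d : Int) (r : Int) (out : Int) : Prop := out = sumOfLastRow_alt s d r
instance (s : Int) (d : Int) (r : Int) (out : Int) : Decidable (Spec_sumOfLastRow s d r out) := by unfold Spec_sumOfLastRow; infer_instance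

-- ===== CLAIM (what is proved, stated in full; the proofs are below) =====
def Claim_equal_sumOfLastRow : Prop := ∀ (s : Int) (d : Int) (r : Int), Dom_sumOfLastRow s d r → Pre_sumOfLastRow s d r → Spec_sumOfLastRow s d r (sumOfLastRow s d r)

-- ===== LEMMAS AND PROOFS =====

theorem digitLoop_shift (m : Nat) : ∀ f : Int, digitLoop m f = f + digitLoop m 0 := by
  induction m using Nat.strong_induction_on with
  | _ m ih =>
    intro f
    by_cases h : m = 0
    · simp [digitLoop, h]
    · have hd : ∀ g : Int, digitLoop m g = digitLoop (m / 8) (g + ((m % 8 : Nat) : Int)) := by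
        intro g; rw [digitLoop]; simp [h]
      rw [hd f, hd 0, ih (m / 8) (Nat.div_lt_self (Nat.pos_of_ne_zero h) (by norm_num)),
          ih (m / 8) (Nat.div_lt_self (Nat.pos_of_ne_zero h) (by norm_num))]
      conv_rhs => rw [ih (m / 8) (Nat.div_lt_self (Nat.pos_of_ne_zero h) (by norm_num))]
      ring

theorem foldl_octChars (m : Nat) :
    ∀ (fin : Int) (acc : List Char),
      (octChars m acc).foldl (fun f c => f + ((c.toNat : Int) - 48)) fin
        = acc.foldl (fun f c => f + ((c.toNat : Int) - 48)) (digitLoop m fin) := by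
  induction m using Nat.strong_induction_on with
  | _ m ih =>
    intro fin acc
    by_cases h : m = 0
    · simp [octChars, digitLoop, h]
    · have hd : digitLoop m fin = digitLoop (m / 8) (fin + ((m % 8 : Nat) : Int)) := by
        rw [digitLoop]; simp [h]
      rw [octChars]
      simp only [h, dite_false]
      rw [hd]
      rw [ih (m / 8) (Nat.div_lt_self (Nat.pos_of_ne_zero h) (by norm_num))]
      simp only [List.foldl_cons]
      congr 1
      have h8 : m % 8 < 8 := Nat.mod_lt m (by norm_num)
      have hc : (Char.ofNat (48 + m % 8)).toNat = 48 + m % 8 := by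
        interval_cases h : (m % 8) <;> decide
      rw [hc, digitLoop_shift (m / 8), digitLoop_shift (m / 8) (fin + _)]
      push_cast
      omega

theorem inner_eq (v : Int) (fin : Int) :
    ((octStr v).toList.drop 2).foldl (fun f c => f + ((c.toNat : Int) - 48)) fin
      = digitLoop v.toNat fin := by
  unfold octStr
  by_cases h : v.toNat = 0
  · simp [h, digitLoop]
  · simp only [h, if_false, String.toList_ofList]
    rw [List.drop_succ_cons, List.drop_succ_cons, List.drop_zero]
    rw [foldl_octChars]
    rfl

-- ===== VERDICT (by name: the statement is the Claim_ definition above) =====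
theorem sumOfLastRow_spec : Claim_equal_sumOfLastRow := by
  intro s d r _ _
  unfold Spec_sumOfLastRow sumOfLastRow sumOfLastRow_alt
  apply PySem.List.foldl_congr_mem
  intro fin i _
  simp only []
  rw [PySem.List.foldl_pyRange_pyGetD' (octStr (octValOfDec s + octValOfDec d * (i - 1))).toList
        '0' (fun f c => f + ((c.toNat : Int) - 48)) fin (a := 2) (by norm_num)]
  exact inner_eq _ fin
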